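-- pv_equiv track=rewrite | github.com/noblebrendon-cloud/signal_agent | app/audit/runtime_audit.py | _extract_output_body
-- ===== SOURCE A (Python) =====
-- def _extract_output_body(output: str) -> str:
--     lines = output.splitlines()
--     for idx, line in enumerate(lines):
--         if line.strip() == "Output:":
--             for trailing in lines[idx + 1 :]:
--                 if trailing.strip():
--                     return trailing.strip()
--     return ""
-- ===== SOURCE B (Python) =====
-- def _extract_output_body(output: str) -> str:
--     seen = False
--     for line in output.splitlines():
--         s = line.strip()
--         if seen and s:
--             return s
--         if s == "Output:":
--             seen = True
--     return ""
-- ===== Notes on version B (the rewrite author's own statement) =====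
-- stated objective: simpler
-- what changed: Replaced A's nested scans (outer marker scan plus inner trailing scan over a slice) with one linear pass over the lines maintaining a boolean flag recording whether the marker line has occurred.
import Mathlib
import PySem

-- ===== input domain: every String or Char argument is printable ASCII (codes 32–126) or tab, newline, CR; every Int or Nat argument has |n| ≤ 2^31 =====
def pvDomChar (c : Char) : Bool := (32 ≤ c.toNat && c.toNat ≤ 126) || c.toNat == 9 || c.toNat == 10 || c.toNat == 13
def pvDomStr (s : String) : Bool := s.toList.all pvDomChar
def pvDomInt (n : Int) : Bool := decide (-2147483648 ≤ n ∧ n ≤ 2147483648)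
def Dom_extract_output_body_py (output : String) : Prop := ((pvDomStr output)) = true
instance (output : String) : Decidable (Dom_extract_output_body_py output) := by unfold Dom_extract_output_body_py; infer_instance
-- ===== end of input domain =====

-- B replaces A's nested scans with one linear pass keeping a boolean marker flag (objective: simpler).

-- ===== PORT A =====
-- inner loop: 'for trailing in lines[idx+1:]: if trailing.strip(): return trailing.strip()'
-- (some v = early return, none = inner loop fell through)
def pvAInner : List String → Option String
  | [] => none
  | t :: ts =>
    if PySem.Str.strip t ≠ "" then some (PySem.Str.strip t) else pvAInner ts

-- outer loop over enumerate(lines); at index idx the remaining suffix after line is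
-- exactly lines[idx+1:], so the recursion carries it directly
def pvAOuter : List String → String
  | [] => ""
  | l :: ls =>
    if PySem.Str.strip l = "Output:" then
      match pvAInner ls with
      | some v => v
      | none => pvAOuter ls
    else pvAOuter ls

def extract_output_body_py (output : String) : String :=
  pvAOuter (PySem.Str.splitlines output)

-- ===== PORT B =====
-- single pass with the 'seen' flag; checked before it can be set by the same line
def pvBLoop : List String → Bool → String
  | [], _ => ""
  | l :: ls, seen =>
    let s := PySem.Str.strip l
    if seen ∧ s ≠ "" then s
    else pvBLoop ls (seen || (s = "Output:"))

def extract_output_body_py_alt (output : String) : String :=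
  pvBLoop (PySem.Str.splitlines output) false

-- ===== PRECONDITION & SPEC =====
def Spec_extract_output_body_py (output : String) (out : String) : Prop := out = extract_output_body_py_alt output
instance (output : String) (out : String) : Decidable (Spec_extract_output_body_py output out) := by unfold Spec_extract_output_body_py; infer_instance

-- ===== CLAIM (what is proved, stated in full; the proofs are below) =====
def Claim_equal_extract_output_body_py : Prop := ∀ (output : String), Dom_extract_output_body_py output → Spec_extract_output_body_py output (extract_output_body_py output)

-- ===== LEMMAS AND PROOFS =====

-- once the flag is set, B returns the first non-blank stripped line, i.e. A's inner scan (or "")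
theorem pvBLoop_true (ls : List String) :
    pvBLoop ls true = (pvAInner ls).getD "" := by
  induction ls with
  | nil => simp [pvBLoop, pvAInner]
  | cons l ls ih =>
    by_cases h : PySem.Str.strip l = ""
    · simp [pvBLoop, pvAInner, h, ih]
    · simp [pvBLoop, pvAInner, h]

-- if A's inner scan finds nothing in ls, the outer loop restricted to ls returns ""
theorem pvAOuter_blank (ls : List String) (h : pvAInner ls = none) :
    pvAOuter ls = "" := by
  induction ls with
  | nil => rfl
  | cons l ls ih =>
    unfold pvAInner at h
    by_cases hs : PySem.Str.strip l = ""
    · simp [hs] at h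
      have hne : PySem.Str.strip l ≠ "Output:" := by simp [hs]
      simp [pvAOuter, hne, ih h]
    · simp [hs] at h

-- main invariant: before the flag is set, A's outer loop and B's pass agree
theorem pvAOuter_eq_pvBLoop (ls : List String) :
    pvAOuter ls = pvBLoop ls false := by
  induction ls with
  | nil => rfl
  | cons l ls ih =>
    by_cases h : PySem.Str.strip l = "Output:"
    · have : pvBLoop (l :: ls) false = pvBLoop ls true := by
        simp [pvBLoop, h]
      rw [this, pvBLoop_true]
      cases hi : pvAInner ls with
      | none => simp [pvAOuter, h, hi, pvAOuter_blank ls hi]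
      | some v => simp [pvAOuter, h, hi]
    · have : pvBLoop (l :: ls) false = pvBLoop ls false := by
        simp [pvBLoop, h]
      simp [pvAOuter, h, this, ih]

-- ===== VERDICT (by name: the statement is the Claim_ definition above) =====
theorem extract_output_body_py_spec : Claim_equal_extract_output_body_py := by
  intro output _
  unfold Spec_extract_output_body_py extract_output_body_py extract_output_body_py_alt
  exact pvAOuter_eq_pvBLoop _
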